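-- pv_equiv track=rewrite | github.com/hansen1416/mediapipe-3js-attempt1 | vibe_results/body21_body25.py | decompose_keypoints
-- ===== SOURCE A (Python) =====
-- def decompose_keypoints(pose_keypoints_2d):
--
--     x = []
--     y = []
--     c = []
--
--     for i in range(0, len(pose_keypoints_2d)):
--         if i % 3 == 0:
--             x.append(pose_keypoints_2d[i])
--         if i % 3 == 1:
--             y.append(pose_keypoints_2d[i])
--         if i % 3 == 2:
--             c.append(pose_keypoints_2d[i])
--
--     return x, y, c
-- ===== SOURCE B (Python) =====
-- def decompose_keypoints(pose_keypoints_2d):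
--     x = list(pose_keypoints_2d[0::3])
--     y = list(pose_keypoints_2d[1::3])
--     c = list(pose_keypoints_2d[2::3])
--     return x, y, c
-- ===== Notes on version B (the rewrite author's own statement) =====
-- stated objective: idiomatic
-- what changed: Replaces the single index loop with three modulo tests and appends by three strided slices [0::3], [1::3], [2::3].
import Mathlib
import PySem

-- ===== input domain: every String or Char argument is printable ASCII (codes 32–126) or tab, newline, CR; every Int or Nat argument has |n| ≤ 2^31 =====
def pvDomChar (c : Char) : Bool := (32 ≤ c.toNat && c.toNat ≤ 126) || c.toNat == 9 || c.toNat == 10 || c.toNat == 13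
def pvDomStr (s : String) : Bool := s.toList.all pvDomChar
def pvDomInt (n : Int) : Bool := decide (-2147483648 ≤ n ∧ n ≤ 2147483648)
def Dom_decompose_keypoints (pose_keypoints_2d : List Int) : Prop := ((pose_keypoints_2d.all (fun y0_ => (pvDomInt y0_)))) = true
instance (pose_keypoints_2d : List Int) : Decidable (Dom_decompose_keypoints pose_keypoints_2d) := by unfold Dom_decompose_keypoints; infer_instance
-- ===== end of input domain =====

-- B replaces A's single index loop (appending by i % 3) with three strided slices [0::3], [1::3], [2::3] (idiomatic).

-- ===== PORT A =====
def decompose_keypoints (pose_keypoints_2d : List Int) : List Int × List Int × List Int :=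
  (PySem.List.pyRange 0 pose_keypoints_2d.length 1).foldl
    (fun s i =>
      let s := if i % 3 = 0 then (s.1 ++ [PySem.List.pyGetD pose_keypoints_2d i 0], s.2.1, s.2.2) else s
      let s := if i % 3 = 1 then (s.1, s.2.1 ++ [PySem.List.pyGetD pose_keypoints_2d i 0], s.2.2) else s
      if i % 3 = 2 then (s.1, s.2.1, s.2.2 ++ [PySem.List.pyGetD pose_keypoints_2d i 0]) else s)
    ([], [], [])

-- ===== PORT B =====
def decompose_keypoints_alt (pose_keypoints_2d : List Int) : List Int × List Int × List Int :=
  ((PySem.List.slice? pose_keypoints_2d (some 0) none 3).getD [],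
   (PySem.List.slice? pose_keypoints_2d (some 1) none 3).getD [],
   (PySem.List.slice? pose_keypoints_2d (some 2) none 3).getD [])

-- ===== PRECONDITION & SPEC =====
def Spec_decompose_keypoints (pose_keypoints_2d : List Int) (out : List Int × List Int × List Int) : Prop := out = decompose_keypoints_alt pose_keypoints_2d
instance (pose_keypoints_2d : List Int) (out : List Int × List Int × List Int) : Decidable (Spec_decompose_keypoints pose_keypoints_2d out) := by unfold Spec_decompose_keypoints; infer_instance

-- ===== CLAIM (what is proved, stated in full; the proofs are below) =====
def Claim_equal_decompose_keypoints : Prop := ∀ (pose_keypoints_2d : List Int), Dom_decompose_keypoints pose_keypoints_2d → Spec_decompose_keypoints pose_keypoints_2d (decompose_keypoints pose_keypoints_2d)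

-- ===== LEMMAS AND PROOFS =====

-- A's loop body, named for the proofs
def pvStepA (xs : List Int) (s : List Int × List Int × List Int) (i : Int) : List Int × List Int × List Int :=
  let s := if i % 3 = 0 then (s.1 ++ [PySem.List.pyGetD xs i 0], s.2.1, s.2.2) else s
  let s := if i % 3 = 1 then (s.1, s.2.1 ++ [PySem.List.pyGetD xs i 0], s.2.2) else s
  if i % 3 = 2 then (s.1, s.2.1, s.2.2 ++ [PySem.List.pyGetD xs i 0]) else s

-- the value A and B read at index i (0 out of range; never hit out of range)
def pvVal (xs : List Int) (i : Nat) : Int := xs.getD i 0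

-- the indices of residue r below n
def pvIdx (r n : Nat) : List Nat := (List.range ((n - r + 2) / 3)).map (fun j => r + 3 * j)

theorem pvStepA_eq (xs : List Int) :
    decompose_keypoints xs = (PySem.List.pyRange 0 xs.length 1).foldl (pvStepA xs) ([], [], []) := rfl

theorem pvRange01 (n : Nat) : PySem.List.pyRange 0 (n : Int) 1 = (List.range n).map (Nat.cast) := by
  unfold PySem.List.pyRange
  simp only [if_neg one_ne_zero]
  have hc : (if (0:Int) < 1 then if (0:Int) < n then (((n:Int) - 0 + 1 - 1) / 1).toNat else 0
      else if (n:Int) < 0 then ((0 - (n:Int) + -1 - 1) / -1).toNat else 0) = n := by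
    split_ifs with h1 h2 <;> omega
  rw [hc]
  apply List.map_congr_left
  intro k _
  omega

theorem pvGetD_cast (xs : List Int) (n : Nat) : PySem.List.pyGetD xs (n : Int) 0 = pvVal xs n := by
  simp [PySem.List.pyGetD, pvVal, List.getD_eq_getElem?_getD]

theorem pvIdx_succ (r n : Nat) (hr : r < 3) :
    pvIdx r (n + 1) = if n % 3 = r then pvIdx r n ++ [n] else pvIdx r n := by
  unfold pvIdx
  by_cases h : n % 3 = r
  · have h1 : (n + 1 - r + 2) / 3 = (n - r + 2) / 3 + 1 := by omega
    have h2 : r + 3 * ((n - r + 2) / 3) = n := by omega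
    simp [h, h1, List.range_succ, h2]
  · have h1 : (n + 1 - r + 2) / 3 = (n - r + 2) / 3 := by omega
    simp [h, h1]

theorem pvFoldA (xs : List Int) (n : Nat) :
    ((List.range n).map (Nat.cast)).foldl (pvStepA xs) ([], [], []) =
      ((pvIdx 0 n).map (pvVal xs), (pvIdx 1 n).map (pvVal xs), (pvIdx 2 n).map (pvVal xs)) := by
  induction n with
  | zero => simp [pvIdx]
  | succ n ih =>
    rw [List.range_succ, List.map_append, List.foldl_append, ih]
    simp only [List.map_cons, List.map_nil, List.foldl_cons, List.foldl_nil]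
    rw [pvIdx_succ 0 n (by omega), pvIdx_succ 1 n (by omega), pvIdx_succ 2 n (by omega)]
    have hm : ((n : Int)) % 3 = ((n % 3 : Nat) : Int) := by omega
    unfold pvStepA
    rw [hm, pvGetD_cast]
    have h3 : n % 3 = 0 ∨ n % 3 = 1 ∨ n % 3 = 2 := by omega
    rcases h3 with h | h | h <;> simp [h]

theorem pvFilterMap_map (xs : List Int) (g : Nat → Nat) (l : List Nat)
    (h : ∀ j ∈ l, g j < xs.length) :
    l.filterMap (fun j => xs[g j]?) = l.map (fun j => pvVal xs (g j)) := by
  induction l with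
  | nil => rfl
  | cons a l ih =>
    have ha : g a < xs.length := h a (List.mem_cons_self)
    simp only [List.filterMap_cons, List.map_cons, List.getElem?_eq_getElem ha]
    rw [ih (fun j hj => h j (List.mem_cons_of_mem a hj))]
    simp [pvVal, List.getD_eq_getElem?_getD, List.getElem?_eq_getElem ha]

theorem pvSliceB (xs : List Int) (k : Nat) (hk : k < 3) :
    (PySem.List.slice? xs (some (k : Int)) none 3).getD [] = (pvIdx k xs.length).map (pvVal xs) := by
  unfold PySem.List.slice? PySem.List.sliceIndices
  simp only [if_neg (by norm_num : (3:Int) ≠ 0)]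
  have hns : ¬ ((3:Int) < 0) := by norm_num
  simp only [hns, if_false, if_neg (by omega : ¬ ((k:Int) < 0))]
  by_cases h : k < xs.length
  · have hstart : min (k : Int) (xs.length : Int) = (k : Int) := by omega
    rw [hstart]
    have hlt : (k : Int) < (xs.length : Int) := by omega
    simp only [if_pos (by norm_num : (0:Int) < 3), if_pos hlt]
    have hcnt : (((xs.length : Int) - k + 3 - 1) / 3).toNat = (xs.length - k + 2) / 3 := by omega
    rw [hcnt]
    simp only [Option.getD_some]
    have hb : ∀ j ∈ List.range ((xs.length - k + 2) / 3),
        (fun j : Nat => ((k : Int) + 3 * (j : Int)).toNat) j < xs.length := by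
      intro j hj
      simp only [List.mem_range] at hj
      show ((k : Int) + 3 * (j : Int)).toNat < xs.length
      omega
    rw [pvFilterMap_map xs (fun j : Nat => ((k : Int) + 3 * (j : Int)).toNat) _ hb]
    unfold pvIdx
    rw [List.map_map]
    apply List.map_congr_left
    intro j _
    have hjx : ((k : Int) + 3 * (j : Int)).toNat = k + 3 * j := by omega
    show pvVal xs ((k : Int) + 3 * (j : Int)).toNat = (pvVal xs ∘ fun j => k + 3 * j) j
    simp only [Function.comp, hjx]
  · have hstart : min (k : Int) (xs.length : Int) = (xs.length : Int) := by omega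
    rw [hstart]
    simp only [if_pos (by norm_num : (0:Int) < 3), if_neg (lt_irrefl ((xs.length : Int)))]
    have hcnt : (xs.length - k + 2) / 3 = 0 := by omega
    simp [pvIdx, hcnt]

-- ===== VERDICT (by name: the statement is the Claim_ definition above) =====
theorem decompose_keypoints_spec : Claim_equal_decompose_keypoints := by
  intro xs _
  unfold Spec_decompose_keypoints decompose_keypoints_alt
  rw [pvStepA_eq, pvRange01, pvFoldA]
  rw [show ((0:Int)) = ((0:Nat):Int) by rfl, show ((1:Int)) = ((1:Nat):Int) by rfl,
      show ((2:Int)) = ((2:Nat):Int) by rfl]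
  rw [pvSliceB xs 0 (by omega), pvSliceB xs 1 (by omega), pvSliceB xs 2 (by omega)]
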